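-- pv_equiv track=rewrite | github.com/Moonhalf383/CS61A-homeworks | notes/data_examples.py | indices_abs_smallest
-- ===== SOURCE A (Python) =====
-- def indices_abs_smallest(l):
--     assert isinstance(l,list) and l != []
--     ans = []
--     l = [abs(i) for i in l]
--     for i in range(len(l)):
--         if l[i] == min(l):
--             ans.append(i)
--     return ans
-- ===== SOURCE B (Python) =====
-- def indices_abs_smallest(l):
--     assert isinstance(l, list) and l != []
--     best = None
--     ans = []
--     for i, x in enumerate(l):
--         a = abs(x)
--         if best is None or a < best:
--             best = a
--             ans = [i]
--         elif a == best:
--             ans.append(i)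
--     return ans
-- ===== Notes on version B (the rewrite author's own statement) =====
-- stated objective: faster
-- what changed: Replaced the loop that recomputes min(l) of the whole abs-list on every iteration with a single enumerate pass maintaining a running best absolute value and resetting/appending the index accumulator.
import Mathlib
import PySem

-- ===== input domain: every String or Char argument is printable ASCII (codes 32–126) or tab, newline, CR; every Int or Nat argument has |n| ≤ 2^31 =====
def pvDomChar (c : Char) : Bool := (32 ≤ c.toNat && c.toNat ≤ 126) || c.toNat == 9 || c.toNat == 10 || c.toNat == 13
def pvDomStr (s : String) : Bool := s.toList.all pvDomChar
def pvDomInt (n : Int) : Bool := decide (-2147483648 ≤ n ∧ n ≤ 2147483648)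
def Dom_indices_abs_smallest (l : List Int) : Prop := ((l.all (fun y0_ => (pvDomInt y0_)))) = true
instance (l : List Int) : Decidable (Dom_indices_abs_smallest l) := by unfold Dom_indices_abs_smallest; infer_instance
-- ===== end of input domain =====

-- B replaces A's per-iteration recomputation of min over the abs-list with a single pass
-- keeping a running best absolute value (objective: faster, O(n^2) -> O(n)).


-- ===== PORT A =====
-- l = [abs(i) for i in l]; for i in range(len(l)): if l[i] == min(l): ans.append(i)
def indices_abs_smallest (l : List Int) : List Int :=
  let la := l.map (fun i => |i|)
  (List.range la.length).foldl
    (fun ans i =>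
      if la.getD i 0 = (PySem.List.min? la (fun y => y)).getD 0 then ans ++ [(i : Int)] else ans)
    []

-- ===== PORT B =====
-- single pass over enumerate(l) with running best absolute value and index accumulator
def altLoop : List (Int × Int) → Option Int → List Int → List Int
  | [], _, ans => ans
  | (i, x) :: rest, best, ans =>
    let a := |x|
    match best with
    | none => altLoop rest (some a) [i]
    | some b =>
      if a < b then altLoop rest (some a) [i]
      else if a = b then altLoop rest (some b) (ans ++ [i])
      else altLoop rest (some b) ans

def indices_abs_smallest_alt (l : List Int) : List Int :=
  altLoop (PySem.List.enumerate l) none []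

-- ===== PRECONDITION & SPEC =====
-- A (and B) assert l != [] : the empty list raises AssertionError, so it is excluded.
def Pre_indices_abs_smallest (l : List Int) : Prop := l ≠ []
instance (l : List Int) : Decidable (Pre_indices_abs_smallest l) := by
  unfold Pre_indices_abs_smallest; infer_instance
def pvWitness_indices_abs_smallest : List Int := [1, -1, 2]
def Spec_indices_abs_smallest (l : List Int) (out : List Int) : Prop := out = indices_abs_smallest_alt l
instance (l : List Int) (out : List Int) : Decidable (Spec_indices_abs_smallest l out) := by
  unfold Spec_indices_abs_smallest; infer_instance

-- ===== CLAIM (what is proved, stated in full; the proofs are below) =====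
def Claim_equal_indices_abs_smallest : Prop := ∀ (l : List Int), Dom_indices_abs_smallest l → Pre_indices_abs_smallest l → Spec_indices_abs_smallest l (indices_abs_smallest l)

-- ===== LEMMAS AND PROOFS =====

-- common characterisation: the (k-offset) indices of elements of la equal to m
def matchIdx : List Int → Int → Int → List Int
  | [], _, _ => []
  | x :: t, k, m => (if x = m then [k] else []) ++ matchIdx t (k + 1) m

theorem foldl_min_le (t : List Int) : ∀ b : Int, t.foldl min b ≤ b := by
  induction t with
  | nil => intro b; simp
  | cons x t ih =>
    intro b
    calc (x :: t).foldl min b = t.foldl min (min b x) := by simp [List.foldl]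
    _ ≤ min b x := ih _
    _ ≤ b := min_le_left _ _

theorem altLoop_eq (xs : List Int) : ∀ (k b : Int) (ans : List Int),
    altLoop (PySem.List.enumerate xs k) (some b) ans
      = (if (xs.map (fun i => |i|)).foldl min b = b then ans else [])
        ++ matchIdx (xs.map (fun i => |i|)) k ((xs.map (fun i => |i|)).foldl min b) := by
  induction xs with
  | nil => intro k b ans; simp [PySem.List.enumerate_nil, altLoop, matchIdx]
  | cons x t ih =>
    intro k b ans
    have hle : (t.map (fun i => |i|)).foldl min (min b |x|) ≤ min b |x| := foldl_min_le _ _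
    rw [PySem.List.enumerate_cons]
    by_cases h1 : |x| < b
    · have hmin : min b |x| = |x| := min_eq_right h1.le
      rw [show altLoop ((k, x) :: PySem.List.enumerate t (k + 1)) (some b) ans
            = altLoop (PySem.List.enumerate t (k + 1)) (some |x|) [k] by
          simp [altLoop, h1]]
      rw [ih (k + 1) |x| [k]]
      simp only [List.map_cons, List.foldl_cons, hmin, matchIdx]
      have hne : (t.map (fun i => |i|)).foldl min |x| ≠ b := by
        have h := foldl_min_le (t.map (fun i => |i|)) |x|
        omega
      rw [if_neg hne]
      by_cases h2 : |x| = (t.map (fun i => |i|)).foldl min |x|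
      · rw [if_pos h2, if_pos (by rw [← h2])]; simp
      · rw [if_neg h2, if_neg (fun hc => h2 hc.symm)]; simp
    · have hmin : min b |x| = b := min_eq_left (by omega)
      by_cases h2 : |x| = b
      · rw [show altLoop ((k, x) :: PySem.List.enumerate t (k + 1)) (some b) ans
              = altLoop (PySem.List.enumerate t (k + 1)) (some b) (ans ++ [k]) by
            simp [altLoop, h2]]
        rw [ih (k + 1) b (ans ++ [k])]
        simp only [List.map_cons, List.foldl_cons, hmin, matchIdx]
        by_cases h3 : (t.map (fun i => |i|)).foldl min b = b
        · rw [if_pos h3, if_pos h3, if_pos (by rw [h2, h3]), List.append_assoc]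
        · rw [if_neg h3, if_neg h3, if_neg (by rw [h2]; exact fun hc => h3 hc.symm)]
          simp
      · rw [show altLoop ((k, x) :: PySem.List.enumerate t (k + 1)) (some b) ans
              = altLoop (PySem.List.enumerate t (k + 1)) (some b) ans by
            simp [altLoop, h1, h2]]
        rw [ih (k + 1) b ans]
        simp only [List.map_cons, List.foldl_cons, hmin, matchIdx]
        have hne : |x| ≠ (t.map (fun i => |i|)).foldl min b := by
          have h := foldl_min_le (t.map (fun i => |i|)) b
          omega
        rw [if_neg hne]; simp

theorem range_filter_matchIdx (la : List Int) (m : Int) : ∀ (c : ℕ),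
    ((List.range la.length).filter (fun i => la.getD i 0 = m)).map (fun i => ((i + c : ℕ) : Int))
      = matchIdx la (c : Int) m := by
  induction la with
  | nil => intro c; simp [matchIdx]
  | cons x t ih =>
    intro c
    have hcomp : ((fun i => ((i + c : ℕ) : Int)) ∘ Nat.succ)
        = fun i => ((i + (c + 1) : ℕ) : Int) := by
      funext i; simp only [Function.comp]; push_cast; ring
    have hpred : ((fun i => decide ((x :: t).getD i 0 = m)) ∘ Nat.succ)
        = fun i => decide (t.getD i 0 = m) := by
      funext i; simp
    rw [List.length_cons, List.range_succ_eq_map, List.filter_cons, List.filter_map, hpred]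
    have hih : (List.map Nat.succ ((List.range t.length).filter
          (fun i => decide (t.getD i 0 = m)))).map (fun i => ((i + c : ℕ) : Int))
        = matchIdx t ((c : Int) + 1) m := by
      rw [List.map_map, hcomp, ih (c + 1)]
      norm_num
    by_cases hx : x = m
    · simp only [List.getD_cons_zero, hx, decide_true, if_true, List.map_cons, hih, matchIdx]
      norm_num
    · simp only [List.getD_cons_zero, hx, decide_false, Bool.false_eq_true, if_false, hih,
        matchIdx]
      simp

theorem foldl_app_if (p : ℕ → Prop) [DecidablePred p] (idxs : List ℕ) : ∀ (acc : List Int),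
    idxs.foldl (fun ans i => if p i then ans ++ [(i : Int)] else ans) acc
      = acc ++ (idxs.filter (fun i => p i)).map (fun i : ℕ => (i : Int)) := by
  induction idxs with
  | nil => intro acc; simp
  | cons j js ih =>
    intro acc
    by_cases hj : p j
    · simp only [List.foldl_cons, List.filter_cons, hj, decide_true, if_true, ih]
      simp
    · simp only [List.foldl_cons, List.filter_cons, hj, decide_false,
        Bool.false_eq_true, if_false, ih]

theorem portA_eq_matchIdx (x : Int) (t : List Int) :
    indices_abs_smallest (x :: t)
      = matchIdx ((x :: t).map (fun i => |i|)) 0 ((t.map (fun i => |i|)).foldl min |x|) := by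
  unfold indices_abs_smallest
  simp only [List.map_cons, PySem.List.min?_id_cons, Option.getD_some]
  rw [foldl_app_if (fun i => (|x| :: t.map (fun i => |i|)).getD i 0
        = (t.map (fun i => |i|)).foldl min |x|)]
  have h := range_filter_matchIdx (|x| :: t.map (fun i => |i|))
      ((t.map (fun i => |i|)).foldl min |x|) 0
  simp only [Nat.add_zero, Nat.cast_zero] at h
  rw [List.nil_append]
  exact h

theorem portB_eq_matchIdx (x : Int) (t : List Int) :
    indices_abs_smallest_alt (x :: t)
      = matchIdx ((x :: t).map (fun i => |i|)) 0 ((t.map (fun i => |i|)).foldl min |x|) := by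
  unfold indices_abs_smallest_alt
  rw [PySem.List.enumerate_cons]
  rw [show altLoop ((0, x) :: PySem.List.enumerate t (0 + 1)) none []
        = altLoop (PySem.List.enumerate t (0 + 1)) (some |x|) [0] by simp [altLoop]]
  rw [altLoop_eq t (0 + 1) |x| [0]]
  simp only [List.map_cons, matchIdx]
  by_cases h : (t.map (fun i => |i|)).foldl min |x| = |x|
  · rw [if_pos h, if_pos h.symm]
  · rw [if_neg h, if_neg (fun hc => h hc.symm)]

-- ===== VERDICT (by name: the statement is the Claim_ definition above) =====
theorem indices_abs_smallest_spec : Claim_equal_indices_abs_smallest := by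
  intro l _ hpre
  unfold Spec_indices_abs_smallest
  match l with
  | [] => exact absurd rfl hpre
  | x :: t => rw [portA_eq_matchIdx, portB_eq_matchIdx]
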